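-- pv_equiv track=rewrite | github.com/mariavyso/advent_of_code | day4/solution.py | total_points_counter
-- ===== SOURCE A (Python) =====
-- def total_points_counter(win_points):
--     total_points = 0
--     card_points = []
--     for point in range(len(win_points)):
--         card_points.append(2**point)
--     if len(card_points) > 0:
--         total_points += int(card_points[-1])
--     else:
--         total_points += 0
--     return total_points
-- ===== SOURCE B (Python) =====
-- def total_points_counter(win_points):
--     return 2 ** (len(win_points) - 1) if win_points else 0
-- ===== Notes on version B (the rewrite author's own statement) =====
-- stated objective: faster
-- what changed: B replaces A's loop building the whole powers-of-two list with the closed form 2**(len-1) for nonempty input, 0 otherwise.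
import Mathlib
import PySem

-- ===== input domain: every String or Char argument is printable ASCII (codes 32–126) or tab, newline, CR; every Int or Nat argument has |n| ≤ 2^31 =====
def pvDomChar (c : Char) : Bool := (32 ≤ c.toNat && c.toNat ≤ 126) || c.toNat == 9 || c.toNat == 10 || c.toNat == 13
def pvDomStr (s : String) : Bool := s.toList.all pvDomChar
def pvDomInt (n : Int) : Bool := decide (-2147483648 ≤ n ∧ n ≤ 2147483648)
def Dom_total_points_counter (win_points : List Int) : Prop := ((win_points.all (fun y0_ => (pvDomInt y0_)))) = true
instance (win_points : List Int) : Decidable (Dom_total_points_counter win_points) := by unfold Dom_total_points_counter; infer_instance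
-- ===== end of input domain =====

-- B replaces A's loop building the list of powers of two with the closed form 2^(len-1) (0 for empty input); objective: faster.

-- ===== PORT A =====
def total_points_counter (win_points : List Int) : Int :=
  let total_points : Int := 0
  let card_points : List Int :=
    (PySem.List.pyRange 0 win_points.length 1).foldl
      (fun acc point => acc ++ [(2 : Int) ^ point.toNat]) []
  if card_points.length > 0 then
    total_points + ((PySem.List.pyGet? card_points (-1)).getD 0)
  else
    total_points + 0

-- ===== PORT B =====
def total_points_counter_alt (win_points : List Int) : Int :=
  if win_points.isEmpty then 0 else (2 : Int) ^ (win_points.length - 1)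

-- ===== PRECONDITION & SPEC =====
def Spec_total_points_counter (win_points : List Int) (out : Int) : Prop := out = total_points_counter_alt win_points
instance (win_points : List Int) (out : Int) : Decidable (Spec_total_points_counter win_points out) := by unfold Spec_total_points_counter; infer_instance

-- ===== CLAIM (what is proved, stated in full; the proofs are below) =====
def Claim_equal_total_points_counter : Prop := ∀ (win_points : List Int), Dom_total_points_counter win_points → Spec_total_points_counter win_points (total_points_counter win_points)

-- ===== LEMMAS AND PROOFS =====

-- A's loop produces exactly the list of powers [2^0, …, 2^(n-1)].
theorem card_points_eq (n : Nat) :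
    (PySem.List.pyRange 0 (n : Int) 1).foldl
      (fun acc point => acc ++ [(2 : Int) ^ point.toNat]) []
      = (List.range n).map (fun k => (2 : Int) ^ k) := by
  rw [PySem.List.foldl_append_singleton_eq_map, PySem.List.pyRange_zero_nat,
    List.map_map]
  simp

-- ===== VERDICT (by name: the statement is the Claim_ definition above) =====
theorem total_points_counter_spec : Claim_equal_total_points_counter := by
  intro win_points _
  unfold Spec_total_points_counter total_points_counter total_points_counter_alt
  simp only []
  rw [card_points_eq win_points.length]
  cases h : win_points.length with
  | zero =>
    have : win_points.isEmpty = true := by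
      cases win_points <;> simp_all
    simp [this]
  | succ m =>
    have hne : win_points.isEmpty = false := by
      cases win_points <;> simp_all
    rw [List.range_succ]
    simp [hne, PySem.List.pyGet?_neg_one, List.getLast?_append]
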